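-- pv_equiv track=rewrite | github.com/BrunoGabrielGodoi/ACO-x-AG | ACO/Main.py | GeneratePheromoneGraph
-- ===== SOURCE A (Python) =====
-- def GeneratePheromoneGraph(graph):
--     phero = [[1 for x in range(len(graph))] for y in range(len(graph[0]))]
--
--     for i in range(len(phero)):
--         for j in range(len(phero[i])):
--             if i == 0:
--                 phero[i][j] = j
--             if j == 0:
--                 phero[i][j] = i
--
--     return phero
-- ===== SOURCE B (Python) =====
-- def GeneratePheromoneGraph(graph):
--     rows = len(graph[0])
--     cols = len(graph)
--     # build the matrix column by column (the pattern is symmetric), then transpose with zip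
--     columns = [list(range(rows))] + [[j] + [1] * (rows - 1) for j in range(1, cols)]
--     return [list(t) for t in zip(*columns)]
-- ===== Notes on version B (the rewrite author's own statement) =====
-- stated objective: alternative
-- what changed: B constructs the transpose of the result column by column (exploiting the pattern's row/column symmetry) and then transposes it with zip(*...), instead of A's allocate-ones-matrix followed by a nested per-cell i==0/j==0 branch scan.
import Mathlib
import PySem

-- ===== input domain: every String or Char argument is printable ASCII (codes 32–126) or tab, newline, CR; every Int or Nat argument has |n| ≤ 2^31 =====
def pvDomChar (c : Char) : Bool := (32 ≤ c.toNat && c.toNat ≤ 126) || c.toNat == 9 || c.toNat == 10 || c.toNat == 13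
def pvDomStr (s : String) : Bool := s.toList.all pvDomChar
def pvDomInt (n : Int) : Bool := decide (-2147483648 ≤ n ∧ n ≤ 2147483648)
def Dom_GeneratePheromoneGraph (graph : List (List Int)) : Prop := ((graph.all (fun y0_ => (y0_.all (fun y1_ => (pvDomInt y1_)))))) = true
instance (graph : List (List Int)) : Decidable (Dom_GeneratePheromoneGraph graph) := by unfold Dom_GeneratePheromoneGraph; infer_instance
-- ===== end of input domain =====

-- B builds the result's TRANSPOSE column by column (the pattern is symmetric) and then
-- transposes it with zip, instead of A's ones-matrix plus a nested per-cell branch scan;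
-- objective: a genuinely different construction of the same matrix.

-- ===== PORT A =====
def GeneratePheromoneGraph (graph : List (List Int)) : List (List Int) :=
  -- phero = [[1 for x in range(len(graph))] for y in range(len(graph[0]))]
  let row0 := PySem.List.pyGetD graph 0 []
  let phero := (List.range row0.length).map (fun _ => (List.range graph.length).map (fun _ => (1 : Int)))
  -- for i in range(len(phero)): for j in range(len(phero[i])): two ifs mutating phero[i][j]
  (List.range phero.length).foldl
    (fun ph i =>
      (List.range (ph.getD i []).length).foldl
        (fun ph j =>
          let ph1 := if i = 0 then ph.set i ((ph.getD i []).set j (Int.ofNat j)) else ph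
          if j = 0 then ph1.set i ((ph1.getD i []).set j (Int.ofNat i)) else ph1)
        ph)
    phero

-- ===== PORT B =====
-- Python's zip(*columns): rows of heads while every column is nonempty
-- (structural recursion on the first column; exact for our equal-length columns).
def pvZipStar : List Int → List (List Int) → List (List Int)
  | [], _ => []
  | x :: c', cs =>
      if cs.any (·.isEmpty) then []
      else (x :: cs.map (fun c => c.headD 0)) :: pvZipStar c' (cs.map (·.tail))

def GeneratePheromoneGraph_alt (graph : List (List Int)) : List (List Int) :=
  let rows := (PySem.List.pyGetD graph 0 []).length
  let cols := graph.length
  -- columns = [list(range(rows))] + [[j] + [1]*(rows-1) for j in range(1, cols)]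
  let col0 := (List.range rows).map Int.ofNat
  let rest := (List.range' 1 (cols - 1)).map (fun j => Int.ofNat j :: List.replicate (rows - 1) (1 : Int))
  pvZipStar col0 rest

-- ===== PRECONDITION & SPEC =====
-- Pre_ excludes only the empty graph, on which Python A raises IndexError at graph[0] (B raises there too).
def Pre_GeneratePheromoneGraph (graph : List (List Int)) : Prop := graph ≠ []
instance (graph : List (List Int)) : Decidable (Pre_GeneratePheromoneGraph graph) := by unfold Pre_GeneratePheromoneGraph; infer_instance
def pvWitness_GeneratePheromoneGraph : List (List Int) := [[1, 2], [3, 4]]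

def Spec_GeneratePheromoneGraph (graph : List (List Int)) (out : List (List Int)) : Prop := out = GeneratePheromoneGraph_alt graph
instance (graph : List (List Int)) (out : List (List Int)) : Decidable (Spec_GeneratePheromoneGraph graph out) := by unfold Spec_GeneratePheromoneGraph; infer_instance

-- ===== CLAIM (what is proved, stated in full; the proofs are below) =====
def Claim_equal_GeneratePheromoneGraph : Prop := ∀ (graph : List (List Int)), Dom_GeneratePheromoneGraph graph → Pre_GeneratePheromoneGraph graph → Spec_GeneratePheromoneGraph graph (GeneratePheromoneGraph graph)

-- ===== LEMMAS AND PROOFS =====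

-- the inner (j-)loop body of port A, lifted to the single row it actually touches
def pvRStep (i j : Nat) (r : List Int) : List Int :=
  let r1 := if i = 0 then r.set j (Int.ofNat j) else r
  if j = 0 then r1.set j (Int.ofNat i) else r1

theorem pv_getElem?_set {α : Type} (l : List α) (i j : Nat) (a : α) :
    (l.set i a)[j]? = if i = j ∧ i < l.length then some a else l[j]? := by
  rw [List.getElem?_set]
  split_ifs with h1 h2 h3 <;> simp_all <;> omega

theorem pv_getDq_set (l : List (List Int)) (i : Nat) (a : List Int) (h : i < l.length) :
    ((l.set i a)[i]?).getD [] = a := by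
  simp [pv_getElem?_set, h]

theorem pv_set_getDq_self (l : List (List Int)) (i : Nat) (h : i < l.length) :
    l.set i ((l[i]?).getD []) = l := by
  have : (l[i]?).getD [] = l[i] := by simp [List.getElem?_eq_getElem h]
  rw [this]; exact List.set_getElem_self h

theorem pv_rstep_len (i j : Nat) (r : List Int) : (pvRStep i j r).length = r.length := by
  unfold pvRStep
  by_cases hi : i = 0 <;> by_cases hj : j = 0 <;> simp [hi, hj]

theorem pv_fold_len (i : Nat) (L : List Nat) : ∀ (r : List Int),
    (L.foldl (fun r j => pvRStep i j r) r).length = r.length := by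
  induction L with
  | nil => intro r; simp
  | cons a L ihL =>
    intro r
    simp only [List.foldl_cons]
    rw [ihL, pv_rstep_len]

-- lifting: A's inner fold over ph equals a single set of row i with a row-level fold
theorem pv_lift (i : Nat) (L : List Nat) : ∀ (ph : List (List Int)), i < ph.length →
    L.foldl
      (fun ph j =>
        let ph1 := if i = 0 then ph.set i ((ph.getD i []).set j (Int.ofNat j)) else ph
        if j = 0 then ph1.set i ((ph1.getD i []).set j (Int.ofNat i)) else ph1)
      ph
    = ph.set i (L.foldl (fun r j => pvRStep i j r) (ph.getD i [])) := by
  induction L with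
  | nil =>
    intro ph h
    simp only [List.foldl_nil, List.getD]
    exact (pv_set_getDq_self ph i h).symm
  | cons j L ih =>
    intro ph h
    have hstep :
        (let ph1 := if i = 0 then ph.set i ((ph.getD i []).set j (Int.ofNat j)) else ph
         if j = 0 then ph1.set i ((ph1.getD i []).set j (Int.ofNat i)) else ph1)
        = ph.set i (pvRStep i j (ph.getD i [])) := by
      by_cases hi : i = 0
      · subst hi
        by_cases hj : j = 0
        · subst hj
          simp [List.getD, pvRStep, pv_getDq_set _ _ _ h, List.set_set]
        · simp [List.getD, hj, pvRStep]
      · by_cases hj : j = 0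
        · subst hj
          simp [List.getD, hi, pvRStep]
        · simp only [List.getD, if_neg hi, if_neg hj, pvRStep]
          exact (pv_set_getDq_self ph i h).symm
    simp only [List.foldl_cons, hstep]
    rw [ih (ph.set i (pvRStep i j (ph.getD i []))) (by simpa using h)]
    simp only [List.getD]
    rw [pv_getDq_set _ _ _ h, List.set_set]

-- row-level fold, i = 0 : result[j]? characterization
theorem pv_fold0_get : ∀ (k : Nat) (r : List Int) (j : Nat),
    ((List.range k).foldl (fun r j => pvRStep 0 j r) r)[j]?
      = if j < k ∧ j < r.length then some (Int.ofNat j) else r[j]? := by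
  intro k
  induction k with
  | zero => intro r j; simp
  | succ k ih =>
    intro r j
    have hstep : ∀ r' : List Int, pvRStep 0 k r' = r'.set k (Int.ofNat k) := by
      intro r'; unfold pvRStep
      by_cases hk : k = 0 <;> simp [hk, List.set_set]
    rw [List.range_succ, List.foldl_append]
    simp only [List.foldl_cons, List.foldl_nil, hstep]
    rw [pv_getElem?_set, pv_fold_len, ih]
    by_cases hkj : k = j
    · subst hkj
      by_cases hjr : k < r.length <;> simp [hjr]
    · have hiff : j < k + 1 ↔ j < k := by omega
      simp [hkj, hiff]

theorem pv_fold0 (cols : Nat) :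
    (List.range cols).foldl (fun r j => pvRStep 0 j r) (List.replicate cols (1 : Int))
      = (List.range cols).map Int.ofNat := by
  apply List.ext_getElem?
  intro j
  rw [pv_fold0_get]
  by_cases hj : j < cols <;> simp [hj]

-- row-level fold, i ≠ 0 : only the j = 0 step acts
theorem pv_foldi (i : Nat) (hi : i ≠ 0) : ∀ (k : Nat), 1 ≤ k → ∀ (r : List Int),
    (List.range k).foldl (fun r j => pvRStep i j r) r = r.set 0 (Int.ofNat i) := by
  intro k
  induction k with
  | zero => intro h; omega
  | succ k ih =>
    intro _ r
    by_cases hk : k = 0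
    · subst hk; simp [pvRStep, hi]
    · rw [List.range_succ, List.foldl_append]
      rw [ih (by omega) r]
      simp [pvRStep, hi, hk]

def pvFinalRow (cols i : Nat) : List Int :=
  if i = 0 then (List.range cols).map Int.ofNat
  else Int.ofNat i :: List.replicate (cols - 1) (1 : Int)

theorem pv_row (cols i : Nat) (hc : 1 ≤ cols) :
    (List.range cols).foldl (fun r j => pvRStep i j r) (List.replicate cols (1 : Int))
      = pvFinalRow cols i := by
  by_cases hi : i = 0
  · subst hi; rw [pv_fold0]; simp [pvFinalRow]
  · rw [pv_foldi i hi cols hc]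
    unfold pvFinalRow
    simp only [hi]
    obtain ⟨c, rfl⟩ : ∃ c, cols = c + 1 := ⟨cols - 1, by omega⟩
    simp [List.replicate_succ]

-- outer fold invariant
theorem pv_outer (rows cols : Nat) (hc : 1 ≤ cols) : ∀ (k : Nat), k ≤ rows →
    (List.range k).foldl
      (fun ph i =>
        (List.range (ph.getD i []).length).foldl
          (fun ph j =>
            let ph1 := if i = 0 then ph.set i ((ph.getD i []).set j (Int.ofNat j)) else ph
            if j = 0 then ph1.set i ((ph1.getD i []).set j (Int.ofNat i)) else ph1)
          ph)
      ((List.range rows).map (fun _ => List.replicate cols (1 : Int)))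
    = (List.range rows).map (fun i => if i < k then pvFinalRow cols i else List.replicate cols (1 : Int)) := by
  intro k
  induction k with
  | zero => intro _; simp
  | succ k ih =>
    intro hk
    have hkr : k < rows := by omega
    rw [List.range_succ, List.foldl_append, ih (by omega)]
    simp only [List.foldl_cons, List.foldl_nil]
    set S := (List.range rows).map (fun i => if i < k then pvFinalRow cols i else List.replicate cols (1 : Int)) with hS
    have hSlen : S.length = rows := by simp [hS]
    have hSk : S.getD k [] = List.replicate cols (1 : Int) := by
      simp [hS, List.getD, hkr]
    rw [pv_lift k _ S (by omega)]
    rw [hSk]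
    simp only [List.length_replicate]
    rw [pv_row cols k hc]
    apply List.ext_getElem?
    intro i
    rw [pv_getElem?_set, hSlen]
    by_cases hik : i = k
    · subst hik; simp [hS, hkr]
    · have hne : ¬ (k = i ∧ k < rows) := by intro ⟨h1, _⟩; exact hik h1.symm
      rw [if_neg hne]
      by_cases hir : i < rows
      · simp [hS, hir, show i ≤ k ↔ i < k from by omega]
      · simp [hS, hir]

theorem pv_map_const (n : Nat) (c : Int) :
    (List.range n).map (fun _ => c) = List.replicate n c := by
  rw [List.eq_replicate_iff]
  constructor
  · simp
  · intro b hb; rcases List.mem_map.mp hb with ⟨a, _, rfl⟩; rfl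

-- zip over identical replicate tail-columns produces the i ≥ 1 rows
theorem pv_zip_tail (cols : Nat) : ∀ (m s : Nat) (L : List (List Int)),
    (∀ c ∈ L, c = List.replicate m (1 : Int)) → L.length = cols →
    pvZipStar ((List.range' s m).map Int.ofNat) L
      = (List.range' s m).map (fun i => Int.ofNat i :: List.replicate cols (1 : Int)) := by
  intro m
  induction m with
  | zero => intro s L _ _; simp [pvZipStar]
  | succ m ih =>
    intro s L hL hlen
    rw [List.range'_succ]
    simp only [List.map_cons, pvZipStar]
    have hne : L.any (·.isEmpty) = false := by
      simp only [List.any_eq_false]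
      intro c hc; rw [hL c hc]; simp
    rw [if_neg (by simp [hne])]
    have hheads : L.map (fun c => c.headD 0) = List.replicate cols (1 : Int) := by
      rw [List.eq_replicate_iff]
      refine ⟨by simp [hlen], ?_⟩
      intro b hb
      rcases List.mem_map.mp hb with ⟨c, hc, rfl⟩
      rw [hL c hc]; simp [List.replicate_succ]
    have htails : ∀ c ∈ L.map (·.tail), c = List.replicate m (1 : Int) := by
      intro c hc
      rcases List.mem_map.mp hc with ⟨c0, hc0, rfl⟩
      rw [hL c0 hc0]; simp
    rw [hheads, ih (s + 1) _ htails (by simp [hlen])]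

theorem pv_zip_eq (rows cols : Nat) (hc : 1 ≤ cols) :
    pvZipStar ((List.range rows).map Int.ofNat)
      ((List.range' 1 (cols - 1)).map (fun j => Int.ofNat j :: List.replicate (rows - 1) (1 : Int)))
    = (List.range rows).map (pvFinalRow cols) := by
  cases rows with
  | zero => simp [pvZipStar]
  | succ m =>
    rw [List.range_eq_range', List.range'_succ]
    simp only [List.map_cons, pvZipStar]
    have hne : ((List.range' 1 (cols - 1)).map
        (fun j => Int.ofNat j :: List.replicate (m + 1 - 1) (1 : Int))).any (·.isEmpty) = false := by
      simp only [List.any_eq_false]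
      intro c hc
      rcases List.mem_map.mp hc with ⟨j, _, rfl⟩
      simp
    rw [if_neg (by simp_all)]
    have hrow0 : (Int.ofNat 0 :: ((List.range' 1 (cols - 1)).map
          (fun j => Int.ofNat j :: List.replicate (m + 1 - 1) (1 : Int))).map (fun c => c.headD 0))
        = (List.range cols).map Int.ofNat := by
      obtain ⟨c, rfl⟩ : ∃ c, cols = c + 1 := ⟨cols - 1, by omega⟩
      rw [List.range_eq_range', List.range'_succ]
      simp [List.map_map, Function.comp]
    have htails : ∀ c ∈ ((List.range' 1 (cols - 1)).map
          (fun j => Int.ofNat j :: List.replicate (m + 1 - 1) (1 : Int))).map (·.tail),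
        c = List.replicate m (1 : Int) := by
      intro c hc
      rcases List.mem_map.mp hc with ⟨c0, hc0, rfl⟩
      rcases List.mem_map.mp hc0 with ⟨j, _, rfl⟩
      simp
    rw [hrow0,
        pv_zip_tail (cols - 1) m 1 _ htails (by simp)]
    simp only [Nat.zero_add, List.map_cons]
    congr 1
    apply List.map_congr_left
    intro i hi
    have hi0 : i ≠ 0 := by
      have := (List.mem_range'_1.mp hi).1; omega
    simp only [pvFinalRow, if_neg hi0]

-- ===== VERDICT (by name: the statement is the Claim_ definition above) =====
theorem GeneratePheromoneGraph_spec : Claim_equal_GeneratePheromoneGraph := by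
  intro graph _ hpre
  unfold Spec_GeneratePheromoneGraph GeneratePheromoneGraph GeneratePheromoneGraph_alt
  have hc : 1 ≤ graph.length := by
    cases graph with
    | nil => exact absurd rfl hpre
    | cons a l => simp
  simp only [pv_map_const]
  rw [List.length_map, List.length_range]
  rw [pv_outer (PySem.List.pyGetD graph 0 []).length graph.length hc _ (le_refl _)]
  rw [pv_zip_eq _ _ hc]
  apply List.map_congr_left
  intro i hi
  rw [if_pos (List.mem_range.mp hi)]
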